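-- pv_equiv track=rewrite | github.com/Asuraking913/HNG-backend-track | api/utils.py | handle_sum
-- ===== SOURCE A (Python) =====
-- def handle_sum(number):
--
--     number = abs(number)
--     individual_nums = []
--
--     if len(str(abs(number))) <= 1:
--         return number
--     else:
--         for num in str(number):
--             if int(num) != 0 and int(num) < number:
--                 individual_nums.append(int(num))
--         return sum(individual_nums)
-- ===== SOURCE B (Python) =====
-- def handle_sum(number):
--     number = abs(number)
--     if number < 10:
--         return number
--     total = 0
--     n = number
--     while n:
--         n, d = divmod(n, 10)
--         total += d
--     return total
-- ===== Notes on version B (the rewrite author's own statement) =====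
-- stated objective: simpler
-- what changed: Replaced the str()-based character loop (with its per-digit int() parsing, the vacuous 'digit < number' filter and an intermediate list that gets summed) by pure arithmetic digit extraction with divmod and a running total; the guard becomes 'number < 10' instead of measuring len(str(number)).
import Mathlib
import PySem

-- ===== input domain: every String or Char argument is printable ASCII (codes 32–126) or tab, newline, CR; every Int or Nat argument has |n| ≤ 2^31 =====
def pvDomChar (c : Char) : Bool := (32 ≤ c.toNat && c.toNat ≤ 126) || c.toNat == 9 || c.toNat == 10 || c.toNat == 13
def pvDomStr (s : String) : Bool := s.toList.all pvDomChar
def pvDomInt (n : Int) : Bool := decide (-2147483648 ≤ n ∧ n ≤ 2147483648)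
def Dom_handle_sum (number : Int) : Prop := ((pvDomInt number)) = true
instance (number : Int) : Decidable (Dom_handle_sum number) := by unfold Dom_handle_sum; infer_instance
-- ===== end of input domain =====

-- B replaces A's string/char digit loop by arithmetic divmod extraction with a running total (objective: simpler).

-- ===== PORT A =====
-- int(num) on a one-character string; on the digit characters produced by str(number) it never fails,
-- so the impossible `none` is defaulted to 0.
def pvCharInt (c : Char) : Int := (PySem.Int.ofStr? (String.ofList [c])).getD 0

def handle_sum (number : Int) : Int :=
  let number := |number|
  if PySem.Str.len (PySem.Int.toStr |number|) ≤ 1 then number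
  else
    (((PySem.Int.toStr number).toList).foldl
      (fun individual_nums num =>
        if pvCharInt num ≠ 0 ∧ pvCharInt num < number then individual_nums ++ [pvCharInt num]
        else individual_nums) []).sum

-- ===== PORT B =====
-- the `while n:` loop of Source B, ported as recursion on the (nonnegative) remaining value n
def pvBLoop (n : Nat) (total : Int) : Int :=
  if n = 0 then total else pvBLoop (n / 10) (total + (n % 10 : Nat))
decreasing_by exact Nat.div_lt_self (Nat.pos_of_ne_zero (by assumption)) (by norm_num)

def handle_sum_alt (number : Int) : Int :=
  let number := |number|
  if number < 10 then number else pvBLoop number.toNat 0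

-- ===== PRECONDITION & SPEC =====
def Spec_handle_sum (number : Int) (out : Int) : Prop := out = handle_sum_alt number
instance (number : Int) (out : Int) : Decidable (Spec_handle_sum number out) := by unfold Spec_handle_sum; infer_instance

-- ===== CLAIM (what is proved, stated in full; the proofs are below) =====
def Claim_equal_handle_sum : Prop := ∀ (number : Int), Dom_handle_sum number → Spec_handle_sum number (handle_sum number)

-- ===== LEMMAS AND PROOFS =====

-- mathematical digit sum, the common value both loops compute
def pvS (n : Nat) : Int :=
  if h : n < 10 then (n : Int) else pvS (n / 10) + (n % 10 : Nat)
decreasing_by exact Nat.div_lt_self (by omega) (by norm_num)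

lemma pvCharInt_digitChar (d : Nat) (hd : d < 10) : pvCharInt (Nat.digitChar d) = d := by
  interval_cases d <;> decide

-- sum of digit values along toDigitsCore
lemma valSum_toDigitsCore (fuel : Nat) : ∀ (n : Nat) (ds : List Char), n < fuel →
    ((Nat.toDigitsCore 10 fuel n ds).map pvCharInt).sum
      = pvS n + ((ds.map pvCharInt).sum) := by
  induction fuel with
  | zero => intro n ds _h; omega
  | succ fuel ih =>
    intro n ds h
    rw [Nat.toDigitsCore]
    by_cases h0 : n / 10 = 0
    · have hn : n < 10 := by omega
      rw [if_pos h0, List.map_cons, List.sum_cons, Nat.mod_eq_of_lt hn,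
        pvCharInt_digitChar n hn, pvS, dif_pos hn]
    · have hn : ¬ n < 10 := by omega
      rw [if_neg h0, ih (n / 10) _ (by omega)]
      conv_rhs => rw [pvS]
      rw [dif_neg hn, List.map_cons, List.sum_cons,
        pvCharInt_digitChar (n % 10) (Nat.mod_lt _ (by omega))]
      ring

-- every character produced by toDigitsCore (over digit-char seeds) is a digitChar
lemma toDigitsCore_chars (fuel : Nat) : ∀ (n : Nat) (ds : List Char),
    (∀ c ∈ ds, ∃ d, d < 10 ∧ c = Nat.digitChar d) →
    ∀ c ∈ Nat.toDigitsCore 10 fuel n ds, ∃ d, d < 10 ∧ c = Nat.digitChar d := by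
  induction fuel with
  | zero => intro n ds hds; exact hds
  | succ fuel ih =>
    intro n ds hds
    rw [Nat.toDigitsCore]
    have hcons : ∀ c ∈ (Nat.digitChar (n % 10)) :: ds, ∃ d, d < 10 ∧ c = Nat.digitChar d := by
      intro c hc
      rcases List.mem_cons.mp hc with h | h
      · exact ⟨n % 10, Nat.mod_lt _ (by norm_num), h⟩
      · exact hds c h
    by_cases h0 : n / 10 = 0
    · simpa [h0] using hcons
    · rw [if_neg h0]; exact ih (n / 10) _ hcons

-- A's filtering fold sums exactly the digit values once the bound m ≥ 10 makes the filter vacuous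
lemma foldl_filter_sum (m : Int) (hm : 10 ≤ m) :
    ∀ (L : List Char), (∀ c ∈ L, ∃ d, d < 10 ∧ c = Nat.digitChar d) →
    ∀ (acc : List Int),
    (L.foldl (fun acc num =>
        if pvCharInt num ≠ 0 ∧ pvCharInt num < m then acc ++ [pvCharInt num] else acc) acc).sum
      = acc.sum + (L.map pvCharInt).sum := by
  intro L
  induction L with
  | nil => intro _ acc; simp
  | cons c L ih =>
    intro hL acc
    obtain ⟨d, hd, rfl⟩ := hL c List.mem_cons_self
    have hv := pvCharInt_digitChar d hd
    by_cases hz : (d : Int) = 0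
    · have : ¬ (pvCharInt (Nat.digitChar d) ≠ 0 ∧ pvCharInt (Nat.digitChar d) < m) := by
        simp [hv, hz]
      simp only [List.foldl_cons, if_neg this]
      rw [ih (fun c hc => hL c (List.mem_cons_of_mem _ hc)) acc]
      simp [hv, hz]
    · have hcond : pvCharInt (Nat.digitChar d) ≠ 0 ∧ pvCharInt (Nat.digitChar d) < m := by
        constructor
        · simpa [hv] using hz
        · rw [hv]; omega
      simp only [List.foldl_cons, if_pos hcond]
      rw [ih (fun c hc => hL c (List.mem_cons_of_mem _ hc)) (acc ++ [pvCharInt (Nat.digitChar d)])]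
      simp [hv]
      ring

-- B's loop computes total + pvS n
lemma pvBLoop_eq (n : Nat) : ∀ total : Int, pvBLoop n total = total + pvS n := by
  induction n using Nat.strong_induction_on with
  | _ n ih =>
    intro total
    rw [pvBLoop]
    by_cases h0 : n = 0
    · simp [h0, pvS]
    · rw [if_neg h0, ih (n / 10) (Nat.div_lt_self (Nat.pos_of_ne_zero h0) (by norm_num))]
      by_cases h10 : n < 10
      · have hdiv : n / 10 = 0 := by omega
        rw [hdiv, Nat.mod_eq_of_lt h10]
        simp [pvS, h10]
      · conv_rhs => rw [pvS]
        rw [dif_neg h10]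
        ring

-- length of toDigitsCore output is at least one more than the seed
lemma toDigitsCore_len (fuel : Nat) : ∀ (n : Nat) (ds : List Char),
    ds.length + 1 ≤ (Nat.toDigitsCore 10 (fuel + 1) n ds).length := by
  induction fuel with
  | zero =>
    intro n ds
    rw [Nat.toDigitsCore]
    by_cases h0 : n / 10 = 0
    · simp [h0]
    · rw [if_neg h0, Nat.toDigitsCore]
      simp
  | succ fuel ih =>
    intro n ds
    rw [Nat.toDigitsCore]
    by_cases h0 : n / 10 = 0
    · simp [h0]
    · rw [if_neg h0]
      have h := ih (n / 10) ((Nat.digitChar (n % 10)) :: ds)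
      rw [List.length_cons] at h
      omega

lemma toDigitsCore_len' (fuel n : Nat) (ds : List Char) (h : fuel ≠ 0) :
    ds.length + 1 ≤ (Nat.toDigitsCore 10 fuel n ds).length := by
  obtain ⟨f, rfl⟩ := Nat.exists_eq_succ_of_ne_zero h
  exact toDigitsCore_len f n ds

-- ===== VERDICT (by name: the statement is the Claim_ definition above) =====
theorem handle_sum_spec : Claim_equal_handle_sum := by
  intro number _
  unfold Spec_handle_sum handle_sum handle_sum_alt
  set m : Int := |number| with hm
  have hm0 : 0 ≤ m := abs_nonneg number
  have habs : |m| = m := abs_of_nonneg hm0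
  have hchars : PySem.Int.toChars m = Nat.toDigits 10 m.toNat := by
    rw [PySem.Int.toChars, if_neg (by omega)]
  by_cases hlt : m < 10
  · -- single digit: both return m; A's guard length = 1
    have hdiv : m.toNat / 10 = 0 := by omega
    have hlen : PySem.Str.len (PySem.Int.toStr |m|) ≤ 1 := by
      rw [habs]
      simp [PySem.Str.len, PySem.Int.toList_toStr, hchars, Nat.toDigits, Nat.toDigitsCore, hdiv]
    simp only [hlen, if_pos, hlt]
  · -- multi digit
    have hge : (10 : Int) ≤ m := by omega
    have hk : 10 ≤ m.toNat := by omega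
    have hlen : ¬ PySem.Str.len (PySem.Int.toStr |m|) ≤ 1 := by
      rw [habs]
      have h2 : 2 ≤ (Nat.toDigits 10 m.toNat).length := by
        rw [Nat.toDigits, Nat.toDigitsCore, if_neg (by omega)]
        have := toDigitsCore_len' m.toNat (m.toNat / 10)
          [Nat.digitChar (m.toNat % 10)] (by omega)
        simpa using this
      simp [PySem.Str.len, PySem.Int.toList_toStr, hchars]
      omega
    rw [if_neg hlen, if_neg hlt]
    have hall : ∀ c ∈ (PySem.Int.toStr m).toList, ∃ d, d < 10 ∧ c = Nat.digitChar d := by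
      rw [PySem.Int.toList_toStr, hchars, Nat.toDigits]
      exact toDigitsCore_chars _ _ _ (by simp)
    rw [foldl_filter_sum m hge _ hall []]
    have hval : (((PySem.Int.toStr m).toList).map pvCharInt).sum = pvS m.toNat := by
      rw [PySem.Int.toList_toStr, hchars, Nat.toDigits,
        valSum_toDigitsCore (m.toNat + 1) m.toNat [] (by omega)]
      simp
    rw [pvBLoop_eq, hval]
    simp
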